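-- pv_equiv track=rewrite | github.com/shaynehowZheng/MS-SMART | PICore/DetectMethod/Trad_Integral.py | __solveFusedPeaks
-- ===== SOURCE A (Python) =====
-- def __solveFusedPeaks(prePeaks):
--     # 融合峰处理
--     result = []
--     tempcluster = [prePeaks[0]]
--     for i in range(len(prePeaks)-1):
--         # 判断前后两峰间距离与两峰宽比值
--         w3 = prePeaks[i+1][0] - prePeaks[i][2]
--         w1 = prePeaks[i][2] - prePeaks[i][0]
--         w2 = prePeaks[i+1][2] - prePeaks[i+1][0]
--         if max(w1,w2) >= 3*w3:
--             tempcluster.append(prePeaks[i+1])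
--         else:
--             result.append(tempcluster)
--             tempcluster = [prePeaks[i+1]]
--     result.append(tempcluster)
--     return result
-- ===== SOURCE B (Python) =====
-- def __solveFusedPeaks(prePeaks):
--     # Two-pass: first collect the cluster boundary indices, then slice the
--     # list at those boundaries.  Empty input yields no clusters.
--     if not prePeaks:
--         return []
--     cuts = [i + 1
--             for i, (p, q) in enumerate(zip(prePeaks, prePeaks[1:]))
--             if max(p[2] - p[0], q[2] - q[0]) < 3 * (q[0] - p[2])]
--     bounds = [0] + cuts + [len(prePeaks)]
--     return [prePeaks[lo:hi] for lo, hi in zip(bounds, bounds[1:])]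
-- ===== Notes on version B (the rewrite author's own statement) =====
-- stated objective: alternative
-- what changed: A grows clusters in one pass with a running accumulator list; B first computes the list of boundary indices (a cut table) and then slices the input at those boundaries in a second pass.
-- crash fix: On the empty list A raises IndexError (it reads prePeaks[0] before the loop); B returns [], the natural 'no peaks, no clusters' answer. — e.g. on __solveFusedPeaks([]): A raises IndexError, B returns []
import Mathlib
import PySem

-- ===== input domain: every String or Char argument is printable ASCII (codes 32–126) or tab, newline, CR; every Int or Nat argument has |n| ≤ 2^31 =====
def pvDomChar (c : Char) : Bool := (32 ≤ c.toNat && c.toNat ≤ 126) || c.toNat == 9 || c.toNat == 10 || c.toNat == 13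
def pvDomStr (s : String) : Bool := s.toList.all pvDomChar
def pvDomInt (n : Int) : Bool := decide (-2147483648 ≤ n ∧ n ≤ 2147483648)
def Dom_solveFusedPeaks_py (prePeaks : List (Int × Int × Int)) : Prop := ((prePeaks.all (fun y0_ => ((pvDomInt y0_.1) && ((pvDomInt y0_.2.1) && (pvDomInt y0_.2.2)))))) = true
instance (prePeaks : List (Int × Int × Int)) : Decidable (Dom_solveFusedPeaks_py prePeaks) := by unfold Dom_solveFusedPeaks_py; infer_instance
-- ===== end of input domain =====

-- B replaces A's single accumulator pass by a boundary table plus slicing; return values agree on all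
-- nonempty inputs (A raises IndexError on [], B returns []).

-- ===== PORT A =====
-- 'for i in range(len(prePeaks)-1)' reading prePeaks[i], prePeaks[i+1]: fold over
-- pyRange with pyGetD (indices are always in range, so the default is never read).
def solveFusedPeaks_py (prePeaks : List (Int × Int × Int)) : List (List (Int × Int × Int)) :=
  let d : Int × Int × Int := (0, 0, 0)
  let result : List (List (Int × Int × Int)) := []
  let tempcluster : List (Int × Int × Int) := [PySem.List.pyGetD prePeaks 0 d]
  let st := (PySem.List.pyRange 0 ((prePeaks.length : Int) - 1) 1).foldl
    (fun (st : List (List (Int × Int × Int)) × List (Int × Int × Int)) i =>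
      let w3 := (PySem.List.pyGetD prePeaks (i + 1) d).1 - (PySem.List.pyGetD prePeaks i d).2.2
      let w1 := (PySem.List.pyGetD prePeaks i d).2.2 - (PySem.List.pyGetD prePeaks i d).1
      let w2 := (PySem.List.pyGetD prePeaks (i + 1) d).2.2 - (PySem.List.pyGetD prePeaks (i + 1) d).1
      if max w1 w2 ≥ 3 * w3 then (st.1, st.2 ++ [PySem.List.pyGetD prePeaks (i + 1) d])
      else (st.1 ++ [st.2], [PySem.List.pyGetD prePeaks (i + 1) d]))
    (result, tempcluster)
  st.1 ++ [st.2]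

-- ===== PORT B =====
def solveFusedPeaks_py_alt (prePeaks : List (Int × Int × Int)) : List (List (Int × Int × Int)) :=
  if prePeaks = [] then []
  else
    let cuts : List Int :=
      ((PySem.List.enumerate (prePeaks.zip prePeaks.tail) 0).filter
        (fun ip => decide (max (ip.2.1.2.2 - ip.2.1.1) (ip.2.2.2.2 - ip.2.2.1) < 3 * (ip.2.2.1 - ip.2.1.2.2)))).map
        (fun ip => ip.1 + 1)
    let bounds : List Int := 0 :: (cuts ++ [(prePeaks.length : Int)])
    (bounds.zip bounds.tail).map (fun lh => PySem.List.slice prePeaks (some lh.1) (some lh.2))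

-- ===== PRECONDITION & SPEC =====
-- Pre_ excludes exactly the empty list, on which A raises IndexError (prePeaks[0]).
def Pre_solveFusedPeaks_py (prePeaks : List (Int × Int × Int)) : Prop := prePeaks ≠ []
instance (prePeaks : List (Int × Int × Int)) : Decidable (Pre_solveFusedPeaks_py prePeaks) := by unfold Pre_solveFusedPeaks_py; infer_instance
def pvWitness_solveFusedPeaks_py : (List (Int × Int × Int)) := [(0, 1, 2), (10, 11, 12)]

-- On the empty list A raises IndexError (it reads prePeaks[0] before the loop); B returns [].
def Raises_solveFusedPeaks_py (prePeaks : List (Int × Int × Int)) : Prop := prePeaks = []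
instance (prePeaks : List (Int × Int × Int)) : Decidable (Raises_solveFusedPeaks_py prePeaks) := by unfold Raises_solveFusedPeaks_py; infer_instance
def pvRaiseWitness_solveFusedPeaks_py : (List (Int × Int × Int)) := []
def pvRaiseWitnessOut_solveFusedPeaks_py : List (List (Int × Int × Int)) := []

def Spec_solveFusedPeaks_py (prePeaks : List (Int × Int × Int)) (out : List (List (Int × Int × Int))) : Prop := out = solveFusedPeaks_py_alt prePeaks
instance (prePeaks : List (Int × Int × Int)) (out : List (List (Int × Int × Int))) : Decidable (Spec_solveFusedPeaks_py prePeaks out) := by unfold Spec_solveFusedPeaks_py; infer_instance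

-- ===== CLAIM (what is proved, stated in full; the proofs are below) =====
def Claim_equal_solveFusedPeaks_py : Prop := ∀ (prePeaks : List (Int × Int × Int)), Dom_solveFusedPeaks_py prePeaks → Pre_solveFusedPeaks_py prePeaks → Spec_solveFusedPeaks_py prePeaks (solveFusedPeaks_py prePeaks)
def Claim_raises_solveFusedPeaks_py : Prop := (∀ (prePeaks : List (Int × Int × Int)), Dom_solveFusedPeaks_py prePeaks → Raises_solveFusedPeaks_py prePeaks → ¬ Pre_solveFusedPeaks_py prePeaks) ∧ (Dom_solveFusedPeaks_py (pvRaiseWitness_solveFusedPeaks_py) ∧ Raises_solveFusedPeaks_py (pvRaiseWitness_solveFusedPeaks_py) ∧ solveFusedPeaks_py_alt (pvRaiseWitness_solveFusedPeaks_py) = pvRaiseWitnessOut_solveFusedPeaks_py)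

-- ===== LEMMAS AND PROOFS =====

-- The common recursive description of the grouping both programs compute.
def pvGroups : List (Int × Int × Int) → List (List (Int × Int × Int))
  | [] => []
  | [x] => [[x]]
  | p :: q :: t =>
    let r := pvGroups (q :: t)
    if max (p.2.2 - p.1) (q.2.2 - q.1) ≥ 3 * (q.1 - p.2.2) then (p :: r.headD []) :: r.tail
    else [p] :: r

theorem pvGroups_head : ∀ (t : List (Int × Int × Int)) (p : Int × Int × Int),
    ∃ c cs, pvGroups (p :: t) = (p :: c) :: cs := by
  intro t
  induction t with
  | nil => intro p; exact ⟨[], [], rfl⟩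
  | cons q t ih =>
    intro p
    obtain ⟨c, cs, h⟩ := ih q
    by_cases hf : max (p.2.2 - p.1) (q.2.2 - q.1) ≥ 3 * (q.1 - p.2.2)
    · exact ⟨q :: c, cs, by simp [pvGroups, hf, h]⟩
    · exact ⟨[], pvGroups (q :: t), by simp [pvGroups, hf]⟩

-- A's indexed loop over range(len-1) is the fold over adjacent pairs.
theorem pvPairFold {σ : Type} (f : σ → (Int × Int × Int) → (Int × Int × Int) → σ)
    (d : Int × Int × Int) (xs : List (Int × Int × Int)) :
    ∀ (m k : Nat) (st : σ), xs.length - (k + 1) = m →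
    (PySem.List.pyRange (k : Int) ((xs.length : Int) - 1) 1).foldl
      (fun st i => f st (PySem.List.pyGetD xs i d) (PySem.List.pyGetD xs (i + 1) d)) st
    = ((xs.drop k).zip (xs.drop (k + 1))).foldl (fun st pq => f st pq.1 pq.2) st := by
  intro m
  induction m with
  | zero =>
    intro k st hk
    have h1 : ((xs.length : Int) - 1) ≤ (k : Int) := by omega
    have h2 : xs.drop (k + 1) = [] := List.drop_eq_nil_of_le (by omega)
    rw [PySem.List.pyRange_one_eq_nil h1, h2]
    simp
  | succ m ih =>
    intro k st hk
    have hlt : k + 1 < xs.length := by omega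
    have hk1 : (k : Int) < (xs.length : Int) - 1 := by omega
    rw [PySem.List.pyRange_one_cons hk1]
    simp only [List.foldl_cons]
    have e1 : PySem.List.pyGetD xs (k : Int) d = xs.getD k d := PySem.List.pyGetD_natCast xs k d
    have e2 : ((k : Int) + 1) = ((k + 1 : Nat) : Int) := by push_cast; ring
    have e3 : PySem.List.pyGetD xs ((k : Int) + 1) d = xs.getD (k + 1) d := by
      rw [e2]; exact PySem.List.pyGetD_natCast xs (k + 1) d
    rw [e1, e3, e2, ih (k + 1) _ (by omega)]
    have hdk : xs.drop k = xs[k] :: xs.drop (k + 1) := List.drop_eq_getElem_cons (by omega)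
    have hdk1 : xs.drop (k + 1) = xs[k + 1] :: xs.drop (k + 2) := List.drop_eq_getElem_cons hlt
    have hg1 : xs.getD k d = xs[k] := by
      simp [List.getD_eq_getElem?_getD, List.getElem?_eq_getElem (by omega : k < xs.length)]
    have hg2 : xs.getD (k + 1) d = xs[k + 1] := by
      simp [List.getD_eq_getElem?_getD, List.getElem?_eq_getElem hlt]
    rw [hg1, hg2, show k + 1 + 1 = k + 2 from by omega]
    conv_rhs => rw [hdk, hdk1]
    rw [hdk1]
    simp only [List.zip_cons_cons, List.foldl_cons]

-- A's loop body in pair form.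
def pvStep (st : List (List (Int × Int × Int)) × List (Int × Int × Int))
    (pq : (Int × Int × Int) × (Int × Int × Int)) :
    List (List (Int × Int × Int)) × List (Int × Int × Int) :=
  if max (pq.1.2.2 - pq.1.1) (pq.2.2.2 - pq.2.1) ≥ 3 * (pq.2.1 - pq.1.2.2)
  then (st.1, st.2 ++ [pq.2]) else (st.1 ++ [st.2], [pq.2])

theorem pvALoop : ∀ (t : List (Int × Int × Int)) (p : Int × Int × Int)
    (res : List (List (Int × Int × Int))) (temp : List (Int × Int × Int)),
    (((p :: t).zip t).foldl pvStep (res, temp)).1 ++ [(((p :: t).zip t).foldl pvStep (res, temp)).2]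
    = res ++ (temp ++ ((pvGroups (p :: t)).headD []).tail) :: (pvGroups (p :: t)).tail := by
  intro t
  induction t with
  | nil => intro p res temp; simp [pvGroups]
  | cons q t ih =>
    intro p res temp
    have hz : ((p :: q :: t).zip (q :: t)) = (p, q) :: ((q :: t).zip t) := rfl
    obtain ⟨c, cs, hg⟩ := pvGroups_head t q
    by_cases hf : max (p.2.2 - p.1) (q.2.2 - q.1) ≥ 3 * (q.1 - p.2.2)
    · rw [hz, List.foldl_cons,
        show pvStep (res, temp) (p, q) = (res, temp ++ [q]) from by simp [pvStep, hf],
        ih q res (temp ++ [q])]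
      simp [pvGroups, hf, hg]
    · rw [hz, List.foldl_cons,
        show pvStep (res, temp) (p, q) = (res ++ [temp], [q]) from by simp [pvStep, hf],
        ih q (res ++ [temp]) [q]]
      simp [pvGroups, hf, hg]

theorem pvA_eq_groups (xs : List (Int × Int × Int)) (h : xs ≠ []) :
    solveFusedPeaks_py xs = pvGroups xs := by
  obtain ⟨p, t, rfl⟩ := List.exists_cons_of_ne_nil h
  have hr := pvPairFold
    (fun st a b =>
      if max (a.2.2 - a.1) (b.2.2 - b.1) ≥ 3 * (b.1 - a.2.2)
      then (st.1, st.2 ++ [b]) else (st.1 ++ [st.2], [b]))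
    (0, 0, 0) (p :: t) ((p :: t).length - 1) 0
    (([] : List (List (Int × Int × Int))), [PySem.List.pyGetD (p :: t) 0 (0, 0, 0)]) (by omega)
  simp only [Nat.cast_zero] at hr
  simp only [solveFusedPeaks_py]
  rw [hr]
  have h0 : PySem.List.pyGetD (p :: t) (0 : Int) (0, 0, 0) = p := by
    rw [show ((0 : Int)) = ((0 : Nat) : Int) from rfl, PySem.List.pyGetD_natCast]; rfl
  rw [h0]
  have hstep : (fun (st : List (List (Int × Int × Int)) × List (Int × Int × Int))
      (pq : (Int × Int × Int) × (Int × Int × Int)) =>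
      if max ((pq.1).2.2 - (pq.1).1) ((pq.2).2.2 - (pq.2).1) ≥ 3 * ((pq.2).1 - (pq.1).2.2)
      then (st.1, st.2 ++ [pq.2]) else (st.1 ++ [st.2], [pq.2])) = pvStep := by
    funext st pq; rfl
  simp only [List.drop_zero, hstep, show List.drop (0 + 1) (p :: t) = t from rfl]
  rw [pvALoop t p [] [p]]
  obtain ⟨c, cs, hg⟩ := pvGroups_head t p
  simp [hg]

-- ---- B side ----

def pvCuts (xs : List (Int × Int × Int)) : List Int :=
  ((PySem.List.enumerate (xs.zip xs.tail) 0).filter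
    (fun ip => decide (max (ip.2.1.2.2 - ip.2.1.1) (ip.2.2.2.2 - ip.2.2.1) < 3 * (ip.2.2.1 - ip.2.1.2.2)))).map
    (fun ip => ip.1 + 1)

def pvSegs (xs : List (Int × Int × Int)) (bs : List Int) : List (List (Int × Int × Int)) :=
  (bs.zip bs.tail).map (fun lh => PySem.List.slice xs (some lh.1) (some lh.2))

theorem pvAlt_eq (xs : List (Int × Int × Int)) (h : xs ≠ []) :
    solveFusedPeaks_py_alt xs = pvSegs xs (0 :: (pvCuts xs ++ [(xs.length : Int)])) := by
  simp [solveFusedPeaks_py_alt, h, pvCuts, pvSegs]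

theorem pvEnumShift {α : Type} (xs : List α) : ∀ (s : Int),
    PySem.List.enumerate xs (s + 1) = (PySem.List.enumerate xs s).map (fun p => (p.1 + 1, p.2)) := by
  induction xs with
  | nil => intro s; simp [PySem.List.enumerate_nil]
  | cons x xs ih =>
    intro s
    rw [PySem.List.enumerate_cons, PySem.List.enumerate_cons, List.map_cons, ih (s + 1)]

theorem pvCuts_pos (xs : List (Int × Int × Int)) : ∀ c ∈ pvCuts xs, 1 ≤ c := by
  intro c hc
  simp only [pvCuts, List.mem_map, List.mem_filter] at hc
  obtain ⟨ip, ⟨hmem, _⟩, rfl⟩ := hc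
  rw [PySem.List.mem_enumerate_iff] at hmem
  obtain ⟨k, hk, rfl⟩ := hmem
  simp

theorem pvCuts_cons (p q : Int × Int × Int) (t : List (Int × Int × Int)) :
    pvCuts (p :: q :: t)
    = (if max (p.2.2 - p.1) (q.2.2 - q.1) < 3 * (q.1 - p.2.2) then [(1 : Int)] else [])
      ++ (pvCuts (q :: t)).map (· + 1) := by
  have hz : ((p :: q :: t).zip (q :: t)) = (p, q) :: ((q :: t).zip t) := rfl
  simp only [pvCuts, List.tail_cons, hz, PySem.List.enumerate_cons, pvEnumShift,
    List.filter_cons, List.filter_map, List.map_map]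
  by_cases hf : max (p.2.2 - p.1) (q.2.2 - q.1) < 3 * (q.1 - p.2.2) <;>
    simp [hf] <;> rfl

theorem pvSlice_succ (x : Int × Int × Int) (xs : List (Int × Int × Int)) (a b : Int)
    (ha : 0 ≤ a) (hb : 0 ≤ b) :
    PySem.List.slice (x :: xs) (some (a + 1)) (some (b + 1)) = PySem.List.slice xs (some a) (some b) := by
  rw [PySem.List.slice_toNat _ (by omega) (by omega), PySem.List.slice_toNat _ ha hb]
  have h1 : (a + 1).toNat = a.toNat + 1 := by omega
  have h2 : (b + 1).toNat = b.toNat + 1 := by omega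
  rw [h1, h2]
  simp [Nat.succ_sub_succ]

theorem pvSegs_shift (x : Int × Int × Int) (xs : List (Int × Int × Int)) (bs : List Int)
    (hpos : ∀ b ∈ bs, 0 ≤ b) :
    pvSegs (x :: xs) (bs.map (· + 1)) = pvSegs xs bs := by
  unfold pvSegs
  rw [← List.map_tail, List.zip_map, List.map_map]
  apply List.map_congr_left
  intro ab hab
  have h1 : ab.1 ∈ bs := (List.of_mem_zip hab).1
  have h2 : ab.2 ∈ bs := List.mem_of_mem_tail (List.of_mem_zip hab).2
  simp only [Function.comp, Prod.map]
  exact pvSlice_succ x xs ab.1 ab.2 (hpos _ h1) (hpos _ h2)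

theorem pvB_eq_groups : ∀ (xs : List (Int × Int × Int)), xs ≠ [] →
    solveFusedPeaks_py_alt xs = pvGroups xs := by
  intro xs
  induction xs with
  | nil => intro h; exact absurd rfl h
  | cons p t ih =>
    intro _
    cases t with
    | nil =>
      rw [pvAlt_eq _ (by simp)]
      have h1 : PySem.List.slice [p] (some 0) (some 1) = [p] :=
        PySem.List.slice_toNat [p] (by norm_num) (by norm_num)
      simp only [pvCuts, pvSegs, pvGroups]
      norm_num [h1]
    | cons q t =>
      rw [pvAlt_eq _ (by simp)]
      have hB := ih (by simp)
      rw [pvAlt_eq _ (by simp)] at hB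
      have hlen : (((p :: q :: t).length : Nat) : Int) = (((q :: t).length : Nat) : Int) + 1 := by
        simp
      have hpos : ∀ b ∈ pvCuts (q :: t) ++ [(((q :: t).length : Nat) : Int)], 0 ≤ b := by
        intro b hb
        rcases List.mem_append.1 hb with hb | hb
        · have := pvCuts_pos _ _ hb; omega
        · simp at hb; omega
      rw [pvCuts_cons, hlen]
      by_cases hf : max (p.2.2 - p.1) (q.2.2 - q.1) ≥ 3 * (q.1 - p.2.2)
      · -- fused: no cut at position 1
        have hnf : ¬ max (p.2.2 - p.1) (q.2.2 - q.1) < 3 * (q.1 - p.2.2) := by omega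
        rw [if_neg hnf]
        simp only [List.nil_append]
        obtain ⟨b, bsr, hbs⟩ : ∃ b bsr, pvCuts (q :: t) ++ [(((q :: t).length : Nat) : Int)] = b :: bsr := by
          cases h : pvCuts (q :: t) with
          | nil => exact ⟨_, [], rfl⟩
          | cons c cs => exact ⟨c, cs ++ [(((q :: t).length : Nat) : Int)], rfl⟩
        have hmap : (pvCuts (q :: t)).map (· + 1) ++ [(((q :: t).length : Nat) : Int) + 1]
            = (pvCuts (q :: t) ++ [(((q :: t).length : Nat) : Int)]).map (· + 1) := by
          simp
        rw [hmap, hbs]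
        have hb0 : (0 : Int) ≤ b := hpos b (by rw [hbs]; simp)
        have hbpos : ∀ x ∈ b :: bsr, (0 : Int) ≤ x := by rw [← hbs]; exact hpos
        -- LHS: pvSegs (p::q::t) (0 :: (b::bsr).map (·+1))
        have hzip : ((0 : Int) :: ((b :: bsr).map (· + 1))).zip (((b :: bsr).map (· + 1)))
            = (0, b + 1) :: (((b :: bsr).map (· + 1)).zip (((b :: bsr).map (· + 1)).tail)) := by
          cases bsr <;> simp
        unfold pvSegs
        rw [List.tail_cons, hzip, List.map_cons]
        -- first segment
        have hfirst : PySem.List.slice (p :: q :: t) (some 0) (some (b + 1))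
            = p :: PySem.List.slice (q :: t) (some 0) (some b) := by
          rw [PySem.List.slice_toNat _ (by norm_num) (by omega),
              PySem.List.slice_toNat _ (by norm_num) hb0]
          have : (b + 1).toNat = b.toNat + 1 := by omega
          simp [this]
        rw [hfirst]
        -- remaining segments = shifted pvSegs of (q::t) over (b::bsr)
        have hrest : (((b :: bsr).map (· + 1)).zip (((b :: bsr).map (· + 1)).tail)).map
              (fun lh => PySem.List.slice (p :: q :: t) (some lh.1) (some lh.2))
            = ((b :: bsr).zip ((b :: bsr).tail)).map
              (fun lh => PySem.List.slice (q :: t) (some lh.1) (some lh.2)) := by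
          have := pvSegs_shift p (q :: t) (b :: bsr) hbpos
          unfold pvSegs at this
          exact this
        rw [hrest]
        -- identify with pvGroups (q::t)
        have hBsegs : pvGroups (q :: t)
            = PySem.List.slice (q :: t) (some 0) (some b)
              :: ((b :: bsr).zip ((b :: bsr).tail)).map
                (fun lh => PySem.List.slice (q :: t) (some lh.1) (some lh.2)) := by
          rw [← hB, hbs]
          unfold pvSegs
          simp
        rw [pvGroups]
        simp only [if_pos hf]
        rw [hBsegs]
        simp
      · -- not fused: cut at position 1
        have hcut : max (p.2.2 - p.1) (q.2.2 - q.1) < 3 * (q.1 - p.2.2) := by omega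
        rw [if_pos hcut]
        have hmap : (1 : Int) :: ((pvCuts (q :: t)).map (· + 1) ++ [(((q :: t).length : Nat) : Int) + 1])
            = ((0 : Int) :: (pvCuts (q :: t) ++ [(((q :: t).length : Nat) : Int)])).map (· + 1) := by
          simp
        have : pvSegs (p :: q :: t)
            (0 :: ((1 : Int) :: ((pvCuts (q :: t)).map (· + 1) ++ [(((q :: t).length : Nat) : Int) + 1])))
            = PySem.List.slice (p :: q :: t) (some 0) (some 1)
              :: pvSegs (p :: q :: t) (((0 : Int) :: (pvCuts (q :: t) ++ [(((q :: t).length : Nat) : Int)])).map (· + 1)) := by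
          rw [← hmap]
          unfold pvSegs
          simp
        simp only [List.cons_append, List.nil_append]
        rw [this]
        have hpos0 : ∀ b ∈ (0 : Int) :: (pvCuts (q :: t) ++ [(((q :: t).length : Nat) : Int)]), 0 ≤ b := by
          intro b hb
          rcases List.mem_cons.1 hb with rfl | hb
          · norm_num
          · exact hpos b hb
        rw [pvSegs_shift p (q :: t) _ hpos0, hB]
        have hfirst : PySem.List.slice (p :: q :: t) (some 0) (some 1) = [p] := by
          rw [PySem.List.slice_toNat _ (by norm_num) (by norm_num)]; rfl
        rw [hfirst, pvGroups]
        simp [hf]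

-- ===== VERDICT (by name: the statement is the Claim_ definition above) =====
theorem solveFusedPeaks_py_spec : Claim_equal_solveFusedPeaks_py := by
  intro xs _ hpre
  unfold Spec_solveFusedPeaks_py
  rw [pvA_eq_groups xs hpre, pvB_eq_groups xs hpre]

def solveFusedPeaks_py_raises : Claim_raises_solveFusedPeaks_py := by
  unfold Claim_raises_solveFusedPeaks_py
  constructor
  · intro xs _ hr
    unfold Pre_solveFusedPeaks_py
    simp [Raises_solveFusedPeaks_py] at hr
    simp [hr]
  · exact ⟨by decide, by decide, by decide⟩
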